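-- pv_equiv track=rewrite | github.com/l1t-w1n/Algo | Exos.py | copieElem
-- ===== SOURCE A (Python) =====
-- def pileVide():
-- 	return []
--
-- def estVide(P):
-- 	return not P
--
-- def empiler(P,n):
-- 	return P.append(n)
--
-- def depiler(p):
-- 	return p.pop()
--
-- def inverse(p):
-- 	res=pileVide()
-- 	save=pileVide()
-- 	if estVide(p):
-- 		return res
-- 	else:
-- 		while not estVide(p):
-- 			e=depiler(p)
-- 			empiler(res,e)
-- 			empiler(save,e)
-- 		while not estVide(save):
-- 			empiler(p,depiler(save))
-- 		return res
--
-- def copieElem(p):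
-- 	res=pileVide()
-- 	save=pileVide()
-- 	save2=pileVide()
-- 	save3=pileVide()
-- 	if estVide(p):
-- 		return p
-- 	else:
-- 		while not estVide(p):
-- 			e=depiler(p)
-- 			empiler(save,e)
-- 			empiler(save2,e)
-- 			empiler(save3,e)
-- 		inverse(save)
-- 		inverse(save2)
-- 		while not estVide(save3):
-- 			empiler(res,depiler(save))
-- 			empiler(res,depiler(save2))
-- 			empiler(p,depiler(save3))
-- 		return res
-- ===== SOURCE B (Python) =====
-- def copieElem(p):
--     res = []
--     for e in p:
--         res.append(e)
--         res.append(e)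
--     return res
-- ===== Notes on version B (the rewrite author's own statement) =====
-- stated objective: simpler
-- what changed: Replaced the four auxiliary stacks, the two inverse() calls and the pop/push shuffling with one forward pass over p appending each element twice; B also leaves p untouched (A mutates p but restores it, so the return value is the same).
import Mathlib
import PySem

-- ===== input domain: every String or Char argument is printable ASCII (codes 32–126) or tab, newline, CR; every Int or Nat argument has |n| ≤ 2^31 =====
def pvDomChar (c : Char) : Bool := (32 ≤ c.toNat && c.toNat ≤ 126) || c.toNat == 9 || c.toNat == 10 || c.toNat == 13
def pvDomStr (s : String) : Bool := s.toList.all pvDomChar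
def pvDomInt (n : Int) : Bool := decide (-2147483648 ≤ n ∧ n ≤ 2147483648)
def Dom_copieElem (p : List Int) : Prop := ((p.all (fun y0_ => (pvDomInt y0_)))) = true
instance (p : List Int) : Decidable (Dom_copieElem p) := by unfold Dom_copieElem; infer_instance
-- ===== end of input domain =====

-- B replaces A's four auxiliary stacks and inverse() shuffling with one forward pass appending
-- each element twice (objective: simpler). A mutates p in place but fully restores it before
-- returning; B never mutates p — the equivalence proved here is about the return value.

-- ===== PORT A =====
-- Python stacks are lists with the TOP AT THE END: push = ++ [e], pop = getLast? / dropLast.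

-- while not estVide(p): e=depiler(p); empiler(res,e); empiler(save,e)   (inverse's first loop)
def pvInvLoop1 (p res save : List Int) : List Int × List Int :=
  match h : p.getLast? with
  | none => (res, save)
  | some e => pvInvLoop1 p.dropLast (res ++ [e]) (save ++ [e])
termination_by p.length
decreasing_by
  have hp : p ≠ [] := by intro hp; subst hp; simp at h
  have := List.length_pos_of_ne_nil hp
  simp [List.length_dropLast]; omega

-- while not estVide(save): empiler(p,depiler(save))   (inverse's second loop)
def pvMoveBack (save p : List Int) : List Int :=
  match h : save.getLast? with
  | none => p
  | some e => pvMoveBack save.dropLast (p ++ [e])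
termination_by save.length
decreasing_by
  have hp : save ≠ [] := by intro hp; subst hp; simp at h
  have := List.length_pos_of_ne_nil hp
  simp [List.length_dropLast]; omega

-- inverse(p): returns (res, state of p after the call)
def pvInverse (p : List Int) : List Int × List Int :=
  if p = [] then ([], p)
  else
    let (res, save) := pvInvLoop1 p [] []
    (res, pvMoveBack save [])

-- while not estVide(p): e=depiler(p); empiler(save,e); empiler(save2,e); empiler(save3,e)
def pvDrain3 (p save save2 save3 : List Int) : List Int × List Int × List Int :=
  match h : p.getLast? with
  | none => (save, save2, save3)
  | some e => pvDrain3 p.dropLast (save ++ [e]) (save2 ++ [e]) (save3 ++ [e])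
termination_by p.length
decreasing_by
  have hp : p ≠ [] := by intro hp; subst hp; simp at h
  have := List.length_pos_of_ne_nil hp
  simp [List.length_dropLast]; omega

-- while not estVide(save3): empiler(res,depiler(save)); empiler(res,depiler(save2)); empiler(p,depiler(save3))
-- (the 'none' fallthroughs for save/save2 are totality guards only: Python would raise there,
--  and the states reached from copieElem never hit them)
def pvOutLoop (save save2 save3 res p : List Int) : List Int × List Int :=
  match h3 : save3.getLast? with
  | none => (res, p)
  | some e3 =>
    match save.getLast?, save2.getLast? with
    | some e1, some e2 =>
        pvOutLoop save.dropLast save2.dropLast save3.dropLast (res ++ [e1] ++ [e2]) (p ++ [e3])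
    | _, _ => (res, p)
termination_by save3.length
decreasing_by
  have hp : save3 ≠ [] := by intro hp; subst hp; simp at h3
  have := List.length_pos_of_ne_nil hp
  simp [List.length_dropLast]; omega

def copieElem (p : List Int) : List Int :=
  if p = [] then p
  else
    let (save, save2, save3) := pvDrain3 p [] [] []
    let save := (pvInverse save).2      -- inverse(save): return value discarded, save restored
    let save2 := (pvInverse save2).2    -- inverse(save2): likewise
    (pvOutLoop save save2 save3 [] []).1   -- res=[], p empty at this point

-- ===== PORT B =====
-- res=[]; for e in p: res.append(e); res.append(e); return res
def copieElem_alt (p : List Int) : List Int :=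
  p.foldl (fun res e => res ++ [e] ++ [e]) []

-- ===== PRECONDITION & SPEC =====
def Spec_copieElem (p : List Int) (out : List Int) : Prop := out = copieElem_alt p
instance (p : List Int) (out : List Int) : Decidable (Spec_copieElem p out) := by unfold Spec_copieElem; infer_instance

-- ===== CLAIM (what is proved, stated in full; the proofs are below) =====
def Claim_equal_copieElem : Prop := ∀ (p : List Int), Dom_copieElem p → Spec_copieElem p (copieElem p)

-- ===== LEMMAS AND PROOFS =====

theorem pvInvLoop1_spec (p res save : List Int) :
    pvInvLoop1 p res save = (res ++ p.reverse, save ++ p.reverse) := by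
  induction p using List.reverseRecOn generalizing res save with
  | nil => rw [pvInvLoop1.eq_def]; simp
  | append_singleton xs x ih =>
      rw [pvInvLoop1.eq_def]
      split
      next h => simp at h
      next e h =>
        simp only [List.getLast?_concat, Option.some.injEq] at h
        subst h
        simp [ih]

theorem pvMoveBack_spec (save p : List Int) : pvMoveBack save p = p ++ save.reverse := by
  induction save using List.reverseRecOn generalizing p with
  | nil => rw [pvMoveBack.eq_def]; simp
  | append_singleton xs x ih =>
      rw [pvMoveBack.eq_def]
      split
      next h => simp at h
      next e h =>
        simp only [List.getLast?_concat, Option.some.injEq] at h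
        subst h
        simp [ih]

theorem pvInverse_snd (p : List Int) : (pvInverse p).2 = p := by
  unfold pvInverse
  split
  · simp
  · simp [pvInvLoop1_spec, pvMoveBack_spec]

theorem pvDrain3_spec (p save save2 save3 : List Int) :
    pvDrain3 p save save2 save3 =
      (save ++ p.reverse, save2 ++ p.reverse, save3 ++ p.reverse) := by
  induction p using List.reverseRecOn generalizing save save2 save3 with
  | nil => rw [pvDrain3.eq_def]; simp
  | append_singleton xs x ih =>
      rw [pvDrain3.eq_def]
      split
      next h => simp at h
      next e h =>
        simp only [List.getLast?_concat, Option.some.injEq] at h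
        subst h
        simp [ih]

theorem pvOutLoop_spec (r res p : List Int) :
    (pvOutLoop r.reverse r.reverse r.reverse res p).1 =
      res ++ r.flatMap (fun e => [e, e]) := by
  induction r generalizing res p with
  | nil => rw [pvOutLoop.eq_def]; simp
  | cons a t ih =>
      rw [pvOutLoop.eq_def]
      simp only [List.reverse_cons, List.getLast?_concat, List.dropLast_concat]
      split
      next h => simp at h
      next e3 h =>
        simp only [List.reverse_cons, List.getLast?_concat, Option.some.injEq] at h
        subst h
        rw [ih]
        simp

theorem copieElem_alt_flatMap (p : List Int) :
    copieElem_alt p = p.flatMap (fun e => [e, e]) := by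
  unfold copieElem_alt
  suffices h : ∀ acc : List Int,
      p.foldl (fun res e => res ++ [e] ++ [e]) acc = acc ++ p.flatMap (fun e => [e, e]) by
    simpa using h []
  induction p with
  | nil => simp
  | cons a t ih => intro acc; simp [List.flatMap_def]

-- ===== VERDICT (by name: the statement is the Claim_ definition above) =====
theorem copieElem_spec : Claim_equal_copieElem := by
  intro p _
  show copieElem p = copieElem_alt p
  unfold copieElem
  rw [copieElem_alt_flatMap]
  split
  · simp [*]
  · simp [pvDrain3_spec, pvInverse_snd, pvOutLoop_spec]
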